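-- pv_equiv track=rewrite | github.com/SevakYapujyan/homework_6 | print_pattern.py | print_p
-- ===== SOURCE A (Python) =====
-- def print_p(num):
--     ls_1 = []
--     ls_2 = []
--     for i in range(2,num+2):
--         for j in range(1,i):
--             ls_1.append(j)
--         ls_2.append(ls_1)
--         ls_1 = []
--     return ls_2
-- ===== SOURCE B (Python) =====
-- def print_p(num):
--     result = []
--     cur = []
--     for k in range(1, num + 1):
--         cur = cur + [k]
--         result.append(cur)
--     return result
-- ===== Notes on version B (the rewrite author's own statement) =====
-- stated objective: simpler
-- what changed: Replaces the nested inner loop that rebuilds each row from scratch with single-pass prefix accumulation: each row is the previous row plus one element.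
import Mathlib
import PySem

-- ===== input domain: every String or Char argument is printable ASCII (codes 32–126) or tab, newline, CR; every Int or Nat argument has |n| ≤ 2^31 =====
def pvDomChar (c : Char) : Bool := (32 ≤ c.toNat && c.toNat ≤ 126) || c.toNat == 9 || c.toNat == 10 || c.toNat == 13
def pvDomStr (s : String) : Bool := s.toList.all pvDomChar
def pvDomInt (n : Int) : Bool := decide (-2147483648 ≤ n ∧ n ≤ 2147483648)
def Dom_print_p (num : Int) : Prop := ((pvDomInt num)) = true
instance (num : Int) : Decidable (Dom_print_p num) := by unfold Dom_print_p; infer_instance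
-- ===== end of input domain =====

-- B replaces A's nested row-rebuilding inner loop with single-pass prefix accumulation (objective: simpler decomposition, same cost).

-- ===== PORT A =====
-- state = (ls_1, ls_2); the inner loop appends j for j in range(1, i), then ls_2 gets ls_1 and ls_1 is reset
def print_p (num : Int) : List (List Int) :=
  let s := (PySem.List.pyRange 2 (num + 2) 1).foldl
    (fun (st : List Int × List (List Int)) i =>
      let ls1 := (PySem.List.pyRange 1 i 1).foldl (fun acc j => acc ++ [j]) st.1
      (([] : List Int), st.2 ++ [ls1]))
    ([], [])
  s.2

-- ===== PORT B =====
-- state = (result, cur); each step cur = cur + [k] (fresh list), result.append(cur)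
def print_p_alt (num : Int) : List (List Int) :=
  let s := (PySem.List.pyRange 1 (num + 1) 1).foldl
    (fun (st : List (List Int) × List Int) k =>
      let cur := st.2 ++ [k]
      (st.1 ++ [cur], cur))
    ([], [])
  s.1

-- ===== PRECONDITION & SPEC =====
def Spec_print_p (num : Int) (out : List (List Int)) : Prop := out = print_p_alt num
instance (num : Int) (out : List (List Int)) : Decidable (Spec_print_p num out) := by unfold Spec_print_p; infer_instance

-- ===== CLAIM (what is proved, stated in full; the proofs are below) =====
def Claim_equal_print_p : Prop := ∀ (num : Int), Dom_print_p num → Spec_print_p num (print_p num)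

-- ===== LEMMAS AND PROOFS =====

theorem foldl_concat (l s : List Int) :
    l.foldl (fun acc j => acc ++ [j]) s = s ++ l := by
  induction l generalizing s with
  | nil => simp
  | cons x xs ih => simp [List.foldl, ih]

theorem foldA_eq (l : List Int) (acc : List (List Int)) :
    (l.foldl
      (fun (st : List Int × List (List Int)) i =>
        let ls1 := (PySem.List.pyRange 1 i 1).foldl (fun acc j => acc ++ [j]) st.1
        (([] : List Int), st.2 ++ [ls1]))
      ([], acc)).2 = acc ++ l.map (fun i => PySem.List.pyRange 1 i 1) := by
  induction l generalizing acc with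
  | nil => simp
  | cons x xs ih =>
    rw [List.foldl_cons]
    dsimp only
    rw [foldl_concat, List.nil_append, ih]
    simp

theorem foldB_eq (l : List Int) (acc : List (List Int)) (cur : List Int) :
    l.foldl
      (fun (st : List (List Int) × List Int) k =>
        let cur := st.2 ++ [k]
        (st.1 ++ [cur], cur))
      (acc, cur)
    = (acc ++ (List.range l.length).map (fun i => cur ++ l.take (i + 1)), cur ++ l) := by
  induction l generalizing acc cur with
  | nil => simp
  | cons x xs ih =>
    simp only [List.foldl, ih]
    refine Prod.ext ?_ (by simp)
    simp only [List.length_cons, List.range_succ_eq_map, List.map_cons, List.map_map]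
    simp [List.append_assoc, Function.comp]

theorem print_p_eq (num : Int) :
    print_p num = (List.range num.toNat).map (fun (k : Nat) => PySem.List.pyRange 1 (2 + (k : Int)) 1) := by
  unfold print_p
  rw [foldA_eq]
  rw [PySem.List.pyRange_one 2 (num + 2)]
  have h : num + 2 - 2 = num := by ring
  rw [h, List.map_map]
  simp [Function.comp, add_comm]

theorem print_p_alt_eq (num : Int) :
    print_p_alt num
      = (List.range num.toNat).map (fun (k : Nat) => PySem.List.pyRange 1 (2 + (k : Int)) 1) := by
  unfold print_p_alt
  rw [foldB_eq]
  simp only [List.nil_append]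
  rw [PySem.List.pyRange_one 1 (num + 1)]
  have h : num + 1 - 1 = num := by ring
  rw [h]
  simp only [List.length_map, List.length_range]
  apply List.map_congr_left
  intro i hi
  rw [List.mem_range] at hi
  rw [← List.map_take, List.take_range]
  have hmin : min (i + 1) num.toNat = i + 1 := by omega
  rw [hmin, PySem.List.pyRange_one]
  have h2 : (2 + (i : Int) - 1).toNat = i + 1 := by omega
  rw [h2]

-- ===== VERDICT (by name: the statement is the Claim_ definition above) =====
theorem print_p_spec : Claim_equal_print_p := by
  intro num _
  unfold Spec_print_p
  rw [print_p_eq, print_p_alt_eq]
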